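-- pv_equiv track=rewrite | github.com/rinaAr/Algs | utils.py | max_number_of_prizes
-- ===== SOURCE A (Python) =====
-- def max_number_of_prizes(n):
--     prizes = []
--     current_prize = 1
--
--     while n > 0:
--         if n - current_prize > current_prize:
--             prizes.append(current_prize)
--             n -= current_prize
--             current_prize += 1
--         else:
--             prizes.append(n)
--             n = 0
--
--     return prizes
-- ===== SOURCE B (Python) =====
-- import math
--
-- def max_number_of_prizes(n):
--     if n <= 0:
--         return []
--     m = (math.isqrt(8 * n + 1) - 1) // 2
--     return list(range(1, m)) + [n - (m - 1) * m // 2]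
-- ===== Notes on version B (the rewrite author's own statement) =====
-- stated objective: alternative
-- what changed: Replaces the greedy while-loop (append the prizes one by one until the remainder is too small) by a closed-form cutoff computed with math.isqrt, returning a range of full prizes plus the single remainder element.
import Mathlib
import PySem

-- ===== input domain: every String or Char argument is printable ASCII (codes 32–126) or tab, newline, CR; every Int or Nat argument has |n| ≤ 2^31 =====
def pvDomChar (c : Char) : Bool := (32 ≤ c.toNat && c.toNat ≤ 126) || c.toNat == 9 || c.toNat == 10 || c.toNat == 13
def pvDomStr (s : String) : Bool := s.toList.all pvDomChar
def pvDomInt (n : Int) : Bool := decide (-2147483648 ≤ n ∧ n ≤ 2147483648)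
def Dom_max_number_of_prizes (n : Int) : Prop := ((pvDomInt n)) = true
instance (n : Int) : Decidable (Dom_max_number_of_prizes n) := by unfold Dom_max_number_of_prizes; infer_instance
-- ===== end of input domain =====

-- B replaces A's greedy while-loop by a closed-form cutoff via an integer square root and
-- one range construction (objective: alternative algorithm; no measured speed difference).

-- ===== PORT A =====
-- Python's while-loop, transliterated with a fuel bound; fuel n.toNat + 2 is enough since
-- every iteration with n > 0 decreases n by current_prize ≥ 1 (current_prize starts at 1
-- and only grows) or sets n = 0.
def pvLoopA (fuel : Nat) (n current : Int) (prizes : List Int) : List Int :=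
  match fuel with
  | 0 => prizes
  | f + 1 =>
    if 0 < n then
      if current < n - current then
        pvLoopA f (n - current) (current + 1) (prizes ++ [current])
      else
        pvLoopA f 0 current (prizes ++ [n])
    else prizes

def max_number_of_prizes (n : Int) : List Int :=
  pvLoopA (n.toNat + 2) n 1 []

-- ===== PORT B =====
-- math.isqrt(8*n+1) is exact here: 8*n+1 > 0 on the branch, and Int.sqrt agrees with
-- Python's isqrt on nonnegative arguments.
def max_number_of_prizes_alt (n : Int) : List Int :=
  if n ≤ 0 then []
  else
    let m := PySem.Int.floordiv (Int.sqrt (8 * n + 1) - 1) 2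
    PySem.List.pyRange 1 m 1 ++ [n - PySem.Int.floordiv ((m - 1) * m) 2]

-- ===== PRECONDITION & SPEC =====
def Spec_max_number_of_prizes (n : Int) (out : List Int) : Prop := out = max_number_of_prizes_alt n
instance (n : Int) (out : List Int) : Decidable (Spec_max_number_of_prizes n out) := by unfold Spec_max_number_of_prizes; infer_instance

-- ===== CLAIM (what is proved, stated in full; the proofs are below) =====
def Claim_equal_max_number_of_prizes : Prop := ∀ (n : Int), Dom_max_number_of_prizes n → Spec_max_number_of_prizes n (max_number_of_prizes n)

-- ===== LEMMAS AND PROOFS =====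

-- triangular number k*(k+1)/2, with Euclidean division (equal to floor division: divisor 2 > 0)
def pvTri (k : Int) : Int := k * (k + 1) / 2

lemma pvTri_succ (k : Int) : pvTri (k + 1) = pvTri k + (k + 1) := by
  unfold pvTri
  have h : (k + 1) * (k + 1 + 1) = k * (k + 1) + 2 * (k + 1) := by ring
  rw [h]
  omega

lemma pvTri_mono {a b : Int} (ha : 0 ≤ a) (hab : a ≤ b) : pvTri a ≤ pvTri b := by
  unfold pvTri
  have h : a * (a + 1) ≤ b * (b + 1) := by nlinarith
  omega

-- the closed-form cutoff: m = (isqrt(8n+1)-1)//2 is the unique m with tri m ≤ n < tri (m+1)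
lemma pvMsel_char (n : Int) (h1 : 1 ≤ n) :
    1 ≤ PySem.Int.floordiv (Int.sqrt (8 * n + 1) - 1) 2 ∧
    pvTri (PySem.Int.floordiv (Int.sqrt (8 * n + 1) - 1) 2) ≤ n ∧
    n < pvTri (PySem.Int.floordiv (Int.sqrt (8 * n + 1) - 1) 2 + 1) := by
  set s : Int := Int.sqrt (8 * n + 1) with hs
  have hnn : (0 : Int) ≤ 8 * n + 1 := by omega
  have hs0 : 0 ≤ s := Int.sqrt_nonneg _
  have hsdef : s = ((Nat.sqrt (8 * n + 1).toNat : Nat) : Int) := hs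
  have htn : (((8 * n + 1).toNat : Nat) : Int) = 8 * n + 1 := Int.toNat_of_nonneg hnn
  have hle : s * s ≤ 8 * n + 1 := by
    have h := Nat.sqrt_le' (8 * n + 1).toNat
    have h2 : ((Nat.sqrt (8 * n + 1).toNat : Nat) : Int) * ((Nat.sqrt (8 * n + 1).toNat : Nat) : Int) ≤ (((8 * n + 1).toNat : Nat) : Int) := by
      exact_mod_cast (by nlinarith [h] : Nat.sqrt (8 * n + 1).toNat * Nat.sqrt (8 * n + 1).toNat ≤ (8 * n + 1).toNat)
    rw [htn] at h2
    rw [hsdef]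
    exact h2
  have hlt : 8 * n + 1 < (s + 1) * (s + 1) := by
    have h := Nat.lt_succ_sqrt' (8 * n + 1).toNat
    have h2 : (((8 * n + 1).toNat : Nat) : Int) < ((Nat.sqrt (8 * n + 1).toNat + 1 : Nat) : Int) * ((Nat.sqrt (8 * n + 1).toNat + 1 : Nat) : Int) := by
      exact_mod_cast (by nlinarith [h] : (8 * n + 1).toNat < (Nat.sqrt (8 * n + 1).toNat + 1) * (Nat.sqrt (8 * n + 1).toNat + 1))
    rw [htn] at h2
    rw [hsdef]
    push_cast at h2 ⊢
    linarith
  have hs3 : 3 ≤ s := by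
    by_contra hc
    have hc2 : s ≤ 2 := by omega
    nlinarith
  rw [PySem.Int.floordiv_eq_ediv_of_pos (by omega : (0:Int) < 2)]
  unfold pvTri
  generalize hmg : (s - 1) / 2 = m
  have hm1 : 1 ≤ m := by omega
  have hpar : s = 2 * m + 1 ∨ s = 2 * m + 2 := by omega
  refine ⟨hm1, ?_, ?_⟩
  · rcases hpar with hp | hp
    · have hb : s * s = 4 * (m * m) + 4 * m + 1 := by rw [hp]; ring
      have h2 : m * (m + 1) = m * m + m := by ring
      omega
    · have hb : s * s = 4 * (m * m) + 8 * m + 4 := by rw [hp]; ring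
      have h2 : m * (m + 1) = m * m + m := by ring
      omega
  · rcases hpar with hp | hp
    · have hb : (s + 1) * (s + 1) = 4 * (m * m) + 8 * m + 4 := by rw [hp]; ring
      have h2 : (m + 1) * (m + 1 + 1) = m * m + 3 * m + 2 := by ring
      obtain ⟨k, hk⟩ := Int.even_mul_succ_self (m + 1)
      omega
    · have hb : (s + 1) * (s + 1) = 4 * (m * m) + 12 * m + 9 := by rw [hp]; ring
      have h2 : (m + 1) * (m + 1 + 1) = m * m + 3 * m + 2 := by ring
      obtain ⟨k, hk⟩ := Int.even_mul_succ_self (m + 1)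
      omega

-- main loop invariant: with enough fuel, the greedy loop from state (n, c) produces
-- the prizes c, c+1, …, m-1 followed by the remainder, where m is the unique cutoff
-- for the "virtual total" n + tri (c-1).
lemma pvLoopA_eq (fuel : Nat) : ∀ (n c : Int) (acc : List Int) (m : Int),
    1 ≤ c → c ≤ n → n.toNat < fuel → c ≤ m →
    pvTri m ≤ n + pvTri (c - 1) → n + pvTri (c - 1) < pvTri (m + 1) →
    pvLoopA fuel n c acc = acc ++ PySem.List.pyRange c m 1 ++ [n + pvTri (c - 1) - pvTri (m - 1)] := by
  induction fuel with
  | zero => intro n c acc m hc hcn hf; omega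
  | succ f ih =>
    intro n c acc m hc hcn hf hcm hlo hhi
    have hn0 : 0 < n := by omega
    have htc : pvTri c = pvTri (c - 1) + c := by
      have := pvTri_succ (c - 1); simpa using this
    show pvLoopA (f + 1) n c acc = _
    unfold pvLoopA
    rw [if_pos hn0]
    by_cases hb : c < n - c
    · rw [if_pos hb]
      -- here n ≥ 2c+1, so the cutoff m is strictly beyond c
      have htc1 : pvTri (c + 1) = pvTri (c - 1) + 2 * c + 1 := by
        have := pvTri_succ c; omega
      have hcm' : c + 1 ≤ m := by
        by_contra hcontra
        have hmc : m = c := by omega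
        rw [hmc] at hhi
        omega
      have hrec := ih (n - c) (c + 1) (acc ++ [c]) m (by omega) (by omega)
        (by omega) hcm' (by simp only [add_sub_cancel_right]; omega)
        (by simp only [add_sub_cancel_right]; omega)
      rw [hrec]
      rw [PySem.List.pyRange_one_cons (by omega : c < m)]
      have harith : n - c + pvTri (c + 1 - 1) = n + pvTri (c - 1) := by
        simp only [add_sub_cancel_right]; omega
      rw [harith]
      simp
    · rw [if_neg hb]
      -- here n ≤ 2c, so the loop emits n and stops; the cutoff m must equal c
      have hmc : m = c := by
        by_contra hcontra
        have hc1m : c + 1 ≤ m := by omega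
        have := pvTri_mono (a := c + 1) (b := m) (by omega) hc1m
        have htc1 : pvTri (c + 1) = pvTri (c - 1) + 2 * c + 1 := by
          have := pvTri_succ c; omega
        omega
      have hf1 : ∃ f', f = f' + 1 := by
        cases f with
        | zero => omega
        | succ f' => exact ⟨f', rfl⟩
      obtain ⟨f', rfl⟩ := hf1
      show pvLoopA (f' + 1) 0 c (acc ++ [n]) = _
      unfold pvLoopA
      rw [if_neg (by omega)]
      have hrem : n + pvTri (c - 1) - pvTri (c - 1) = n := by omega
      rw [hmc, PySem.List.pyRange_one_eq_nil (le_refl c), hrem]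
      simp

-- ===== VERDICT (by name: the statement is the Claim_ definition above) =====
theorem max_number_of_prizes_spec : Claim_equal_max_number_of_prizes := by
  intro n _
  unfold Spec_max_number_of_prizes max_number_of_prizes max_number_of_prizes_alt
  by_cases hn : n ≤ 0
  · rw [if_pos hn]
    show pvLoopA (n.toNat + 2) n 1 [] = []
    unfold pvLoopA
    rw [if_neg (by omega)]
  · rw [if_neg hn]
    replace hn : 1 ≤ n := by omega
    obtain ⟨hm1, hlo, hhi⟩ := pvMsel_char n hn
    set m : Int := PySem.Int.floordiv (Int.sqrt (8 * n + 1) - 1) 2 with hm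
    have h := pvLoopA_eq (n.toNat + 2) n 1 [] m (le_refl 1) hn (by omega) hm1
      (by simpa [pvTri] using hlo) (by simpa [pvTri] using hhi)
    rw [h]
    have hfd : PySem.Int.floordiv ((m - 1) * m) 2 = pvTri (m - 1) := by
      rw [PySem.Int.floordiv_eq_ediv_of_pos (by omega)]
      unfold pvTri
      have : (m - 1) * (m - 1 + 1) = (m - 1) * m := by ring
      rw [this]
    show [] ++ PySem.List.pyRange 1 m 1 ++ [n + pvTri (1 - 1) - pvTri (m - 1)] =
      PySem.List.pyRange 1 m 1 ++ [n - PySem.Int.floordiv ((m - 1) * m) 2]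
    rw [hfd]
    have h0 : pvTri (1 - 1) = 0 := by norm_num [pvTri]
    rw [h0]
    simp
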